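-- pv_equiv track=rewrite | github.com/yoshivda/aoc2023 | days/day14.py | move_to_start
-- ===== SOURCE A (Python) =====
-- def move_to_start(row):
--     res = ['.'] * len(row)
--     next_pos = 0
--     for j, c in enumerate(row):
--         if c == '#':
--             res[j] = '#'
--             next_pos = j + 1
--         elif c == 'O':
--             res[next_pos] = 'O'
--             next_pos += 1
--     return res
-- ===== SOURCE B (Python) =====
-- def move_to_start(row):
--     res = []
--     i = 0
--     n = len(row)
--     while i < n:
--         if row[i] == '#':
--             res.append('#')
--             i += 1
--         else:
--             j = i
--             while j < n and row[j] != '#':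
--                 j += 1
--             k = row[i:j].count('O')
--             res.extend(['O'] * k + ['.'] * (j - i - k))
--             i = j
--     return res
-- ===== Notes on version B (the rewrite author's own statement) =====
-- stated objective: alternative
-- what changed: Instead of threading a next_pos cursor through a preallocated result and writing into it, B splits the row into wall-delimited segments, counts the 'O's in each segment and rebuilds it as O-prefix plus dot-padding.
import Mathlib
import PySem

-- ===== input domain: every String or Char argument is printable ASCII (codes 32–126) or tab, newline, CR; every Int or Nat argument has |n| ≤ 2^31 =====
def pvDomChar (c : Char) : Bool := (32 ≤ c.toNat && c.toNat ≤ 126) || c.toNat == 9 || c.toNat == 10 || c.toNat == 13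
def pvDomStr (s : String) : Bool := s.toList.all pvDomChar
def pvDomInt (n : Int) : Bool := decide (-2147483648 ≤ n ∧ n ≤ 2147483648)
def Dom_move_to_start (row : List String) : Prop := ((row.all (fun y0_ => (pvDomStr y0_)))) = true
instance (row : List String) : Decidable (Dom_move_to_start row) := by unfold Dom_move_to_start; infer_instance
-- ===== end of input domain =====

-- B rebuilds each wall-delimited segment from its 'O'-count instead of threading a write cursor; alternative decomposition, same cost.

-- ===== PORT A =====
-- A's loop: state (res, next_pos) with j the current enumerate index.
def pvGoA : List String → List String → Nat → Nat → List String
  | [], res, _, _ => res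
  | c :: rest, res, next_pos, j =>
    if c = "#" then pvGoA rest (res.set j "#") (j + 1) (j + 1)
    else if c = "O" then pvGoA rest (res.set next_pos "O") (next_pos + 1) (j + 1)
    else pvGoA rest res next_pos (j + 1)

def move_to_start (row : List String) : List String :=
  pvGoA row (List.replicate row.length ".") 0 0

-- ===== PORT B =====
-- inner while of B: scan the wall-free segment, returning (segment, remainder)
def pvSeg : List String → List String × List String
  | [] => ([], [])
  | c :: rest => if c = "#" then ([], c :: rest)
                 else ((c :: (pvSeg rest).1), (pvSeg rest).2)

theorem pvSeg_snd_len : ∀ (l : List String), (pvSeg l).2.length ≤ l.length := by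
  intro l; induction l with
  | nil => simp [pvSeg]
  | cons c rest ih =>
    by_cases h : c = "#" <;> simp [pvSeg, h] <;> omega

-- outer while of B
def pvAltGo : List String → List String
  | [] => []
  | c :: rest =>
    if h : c = "#" then "#" :: pvAltGo rest
    else
      List.replicate ((pvSeg (c :: rest)).1.count "O") "O" ++
      List.replicate ((pvSeg (c :: rest)).1.length - (pvSeg (c :: rest)).1.count "O") "." ++
      pvAltGo (pvSeg (c :: rest)).2
termination_by l => l.length
decreasing_by
  · simp
  · simp only [pvSeg, if_neg h]
    have := pvSeg_snd_len rest
    simp; omega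

def move_to_start_alt (row : List String) : List String := pvAltGo row

-- ===== PRECONDITION & SPEC =====
def Spec_move_to_start (row : List String) (out : List String) : Prop := out = move_to_start_alt row
instance (row : List String) (out : List String) : Decidable (Spec_move_to_start row out) := by unfold Spec_move_to_start; infer_instance

-- ===== CLAIM (what is proved, stated in full; the proofs are below) =====
def Claim_equal_move_to_start : Prop := ∀ (row : List String), Dom_move_to_start row → Spec_move_to_start row (move_to_start row)

-- ===== LEMMAS AND PROOFS =====

-- proof-side characterisation of A's loop: d dots are "owed" (placeholders between next_pos and j)
def pvF : List String → Nat → List String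
  | [], d => List.replicate d "."
  | c :: rest, d =>
    if c = "#" then List.replicate d "." ++ "#" :: pvF rest 0
    else if c = "O" then "O" :: pvF rest d
    else pvF rest (d + 1)

theorem pv_set_rep (fixed : List String) (n d : Nat) (h : d < n) (a : String) :
    (fixed ++ List.replicate n (".":String)).set (fixed.length + d) a
      = fixed ++ List.replicate d "." ++ a :: List.replicate (n - d - 1) "." := by
  induction fixed with
  | nil =>
    simp only [List.nil_append, List.length_nil, Nat.zero_add]
    induction n generalizing d with
    | zero => omega
    | succ m ih =>
      cases d with
      | zero => simp [List.replicate_succ]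
      | succ d' =>
        simp only [List.replicate_succ, List.set_cons_succ, ih d' (by omega)]
        simp
  | cons x xs ih =>
    simp only [List.length_cons, List.cons_append]
    rw [show xs.length + 1 + d = (xs.length + d) + 1 by omega, List.set_cons_succ, ih]

theorem pvGoA_eq : ∀ (rest fixed : List String) (d : Nat) (res : List String) (np j : Nat),
    res = fixed ++ List.replicate (d + rest.length) "." →
    np = fixed.length → j = fixed.length + d →
    pvGoA rest res np j = fixed ++ pvF rest d := by
  intro rest
  induction rest with
  | nil =>
    intro fixed d res np j hr _ _
    subst hr; simp [pvGoA, pvF]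
  | cons c r ih =>
    intro fixed d res np j hr hnp hj
    by_cases h1 : c = "#"
    · subst h1 hnp hj
      simp only [List.length_cons] at hr
      simp only [pvGoA, reduceIte, pvF]
      rw [ih (fixed ++ List.replicate d "." ++ ["#"]) 0 _ _ _ ?_ ?_ ?_]
      · simp
      · rw [hr, pv_set_rep fixed (d + (r.length + 1)) d (by omega) "#"]
        rw [show d + (r.length + 1) - d - 1 = r.length from by omega]
        simp
      · simp
        omega
      · simp
        try omega
    · by_cases h2 : c = "O"
      · subst h2 hnp hj
        simp only [List.length_cons] at hr
        simp only [pvGoA, if_neg h1, reduceIte, pvF]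
        rw [ih (fixed ++ ["O"]) d _ _ _ ?_ ?_ ?_]
        · simp
        · have hset := pv_set_rep fixed (d + (r.length + 1)) 0 (by omega) "O"
          simp only [Nat.add_zero] at hset
          rw [hr, hset, show d + (r.length + 1) - 0 - 1 = d + r.length from by omega]
          simp
        · simp
          try omega
        · simp
          try omega
      · subst hnp hj
        simp only [List.length_cons] at hr
        simp only [pvGoA, if_neg h1, if_neg h2, pvF]
        rw [ih fixed (d + 1) _ _ _ ?_ ?_ ?_]
        · rw [hr]
          rw [show d + (r.length + 1) = d + 1 + r.length from by omega]
        · rfl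
        · omega

theorem pvSeg_spec : ∀ (l : List String),
    (pvSeg l).1 ++ (pvSeg l).2 = l ∧ "#" ∉ (pvSeg l).1 ∧
      ((pvSeg l).2 = [] ∨ ∃ r, (pvSeg l).2 = "#" :: r) := by
  intro l; induction l with
  | nil => simp [pvSeg]
  | cons c rest ih =>
    by_cases h : c = "#"
    · simp [pvSeg, h]
    · obtain ⟨e1, e2, e3⟩ := ih
      refine ⟨by simp [pvSeg, h, e1], ?_, by simpa [pvSeg, h] using e3⟩
      simp only [pvSeg, if_neg h, List.mem_cons, not_or]
      exact ⟨fun hh => h hh.symm, e2⟩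

theorem pvF_seg : ∀ (s rest : List String) (d : Nat), "#" ∉ s →
    pvF (s ++ rest) d
      = List.replicate (s.count "O") "O" ++ pvF rest (d + (s.length - s.count "O")) := by
  intro s
  induction s with
  | nil => intro rest d _; simp
  | cons c s' ih =>
    intro rest d hns
    have hc : c ≠ "#" := fun h => hns (by simp [h])
    have hs' : "#" ∉ s' := fun h => hns (by simp [h])
    by_cases h2 : c = "O"
    · have hcnt : (c :: s').count "O" = s'.count "O" + 1 := by
        simp [List.count_cons, h2]
      simp only [List.cons_append, pvF, if_neg hc, if_pos h2, ih rest d hs', hcnt,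
        List.replicate_succ, List.length_cons]
      have : s'.length + 1 - (s'.count "O" + 1) = s'.length - s'.count "O" := by omega
      rw [this]
    · have hcnt : (c :: s').count "O" = s'.count "O" := by
        simp [List.count_cons, h2]
      simp only [List.cons_append, pvF, if_neg hc, if_neg h2, ih rest (d + 1) hs', hcnt,
        List.length_cons]
      have hle := List.count_le_length (l := s') (a := "O")
      have : d + 1 + (s'.length - s'.count "O") = d + (s'.length + 1 - s'.count "O") := by omega
      rw [this]

theorem pvAltGo_eq_aux : ∀ (n : Nat) (l : List String), l.length ≤ n → pvAltGo l = pvF l 0 := by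
  intro n
  induction n with
  | zero =>
    intro l hl
    have hnil : l = [] := List.eq_nil_of_length_eq_zero (by omega)
    subst hnil; simp [pvAltGo, pvF]
  | succ m ih =>
    intro l hl
    cases l with
    | nil => simp [pvAltGo, pvF]
    | cons c rest =>
      by_cases h : c = "#"
      · subst h
        simp only [pvAltGo, pvF, reduceIte, reduceDIte]
        rw [ih rest (by simpa using hl)]
        simp
      · obtain ⟨hsplit, hnotin, hrest⟩ := pvSeg_spec (c :: rest)
        have hfe : pvF (c :: rest) 0
            = List.replicate ((pvSeg (c :: rest)).1.count "O") "O" ++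
              pvF (pvSeg (c :: rest)).2
                (0 + ((pvSeg (c :: rest)).1.length - (pvSeg (c :: rest)).1.count "O")) := by
          conv_lhs => rw [← hsplit]
          exact pvF_seg _ _ 0 hnotin
        simp only [pvAltGo, dif_neg h]
        rw [hfe]
        rcases hrest with h0 | ⟨r, hr⟩
        · rw [h0]; simp [pvAltGo, pvF]
        · have hlen : r.length ≤ m := by
            have h1 : (pvSeg (c :: rest)).2.length ≤ rest.length := by
              have := pvSeg_snd_len rest
              simp only [pvSeg, if_neg h] at *
              exact this
            rw [hr] at h1
            simp at h1
            simp at hl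
            omega
          rw [hr]
          simp only [pvF, if_pos rfl, Nat.zero_add, pvAltGo, dif_pos rfl]
          rw [ih r hlen]
          simp

-- ===== VERDICT (by name: the statement is the Claim_ definition above) =====
theorem move_to_start_spec : Claim_equal_move_to_start := by
  intro row _
  unfold Spec_move_to_start move_to_start move_to_start_alt
  have h := pvGoA_eq row [] 0 (List.replicate row.length ".") 0 0 (by simp) rfl rfl
  rw [h, pvAltGo_eq_aux row.length row le_rfl]
  simp
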